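-- pv_equiv track=rewrite | github.com/tyrantlink/plural | src/version.py | calculate_version
-- ===== SOURCE A (Python) =====
-- VERSION = '2.0.0'
--
-- def calculate_version(
--     commits: dict[str, str]
-- ) -> list[int]:
--     version = list(map(int, VERSION.split('.')))
--
--     for message in commits.values():
--         match message.strip().lower()[:6]:
--             case 'major;':
--                 version = [version[0]+1, 0, 0]
--             case 'minor;':
--                 version = [version[0], version[1]+1, 0]
--             case 'patch;' | _:
--                 version[2] += 1
--
--     return version
-- ===== SOURCE B (Python) =====
-- VERSION = '2.0.0'
--
-- def calculate_version(
--     commits: dict[str, str]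
-- ) -> list[int]:
--     base_major, base_minor, base_patch = (int(p) for p in VERSION.split('.'))
--
--     majors = minors = patches = 0
--     seen_major = seen_minor = False
--
--     # one reverse pass: count patches until the first reset from the end,
--     # minors until the first major from the end, majors all the way
--     for message in reversed(list(commits.values())):
--         kind = message.strip().lower()[:6]
--         if kind == 'major;':
--             majors += 1
--             seen_major = True
--         elif kind == 'minor;':
--             if not seen_major:
--                 minors += 1
--             seen_minor = True
--         elif not (seen_major or seen_minor):
--             patches += 1
--
--     return [
--         base_major + majors,
--         minors if seen_major else base_minor + minors,
--         patches if seen_major or seen_minor else base_patch + patches,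
--     ]
-- ===== Notes on version B (the rewrite author's own statement) =====
-- stated objective: alternative
-- what changed: A folds a mutable [major,minor,patch] triple forward over the commit messages with reset rules; B makes a single reverse pass keeping per-level counters and seen_major/seen_minor flags (counting minors only until the first major from the end and patches only until the first reset), then combines them with the base VERSION components.
import Mathlib
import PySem

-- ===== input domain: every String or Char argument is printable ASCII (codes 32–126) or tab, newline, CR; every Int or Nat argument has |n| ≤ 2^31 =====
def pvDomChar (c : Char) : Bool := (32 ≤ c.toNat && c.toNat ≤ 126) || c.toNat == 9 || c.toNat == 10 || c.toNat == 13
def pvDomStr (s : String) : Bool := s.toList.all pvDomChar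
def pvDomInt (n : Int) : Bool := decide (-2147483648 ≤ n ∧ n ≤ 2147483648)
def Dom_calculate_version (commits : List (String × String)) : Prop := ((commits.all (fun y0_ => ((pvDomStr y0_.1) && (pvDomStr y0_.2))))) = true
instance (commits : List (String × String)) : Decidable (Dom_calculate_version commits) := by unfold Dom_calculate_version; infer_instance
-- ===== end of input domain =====

-- B replaces A's forward fold of a mutable version triple by a single reverse
-- pass with counters and 'seen' flags (objective: alternative decomposition).

def VERSION : String := "2.0.0"

-- message.strip().lower()[:6]  (shared classification expression of both Pythons)
def pvKey (m : String) : String :=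
  PySem.Str.slice (PySem.Str.lower (PySem.Str.strip m)) none (some 6)

-- ===== PORT A =====
-- one loop iteration of A (version[i] via pyGetD/pySetD; version always has length 3)
def pvStepA (version : List Int) (message : String) : List Int :=
  if pvKey message = "major;" then
    [PySem.List.pyGetD version 0 0 + 1, 0, 0]
  else if pvKey message = "minor;" then
    [PySem.List.pyGetD version 0 0, PySem.List.pyGetD version 1 0 + 1, 0]
  else
    PySem.List.pySetD version 2 (PySem.List.pyGetD version 2 0 + 1)

def calculate_version (commits : List (String × String)) : List Int :=
  -- version = list(map(int, VERSION.split('.')))  (int() cannot fail on "2"/"0"/"0")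
  let version : List Int :=
    ((PySem.Str.split? VERSION ".").getD []).map (fun s => (PySem.Int.ofStr? s).getD 0)
  ((PySem.Dict.ofList commits).values).foldl pvStepA version

-- ===== PORT B =====
-- one iteration of B's reverse loop; state = (majors, minors, patches, seen_major, seen_minor)
def pvStepB (st : Int × Int × Int × Bool × Bool) (message : String) : Int × Int × Int × Bool × Bool :=
  let (majors, minors, patches, seen_major, seen_minor) := st
  if pvKey message = "major;" then
    (majors + 1, minors, patches, true, seen_minor)
  else if pvKey message = "minor;" then
    (majors, if seen_major then minors else minors + 1, patches, seen_major, true)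
  else if !(seen_major || seen_minor) then
    (majors, minors, patches + 1, seen_major, seen_minor)
  else st

def calculate_version_alt (commits : List (String × String)) : List Int :=
  let base : List Int :=
    ((PySem.Str.split? VERSION ".").getD []).map (fun s => (PySem.Int.ofStr? s).getD 0)
  let base_major := base.getD 0 0
  let base_minor := base.getD 1 0
  let base_patch := base.getD 2 0
  let st := (((PySem.Dict.ofList commits).values).reverse).foldl pvStepB (0, 0, 0, false, false)
  let (majors, minors, patches, seen_major, seen_minor) := st
  [base_major + majors,
   if seen_major then minors else base_minor + minors,
   if seen_major || seen_minor then patches else base_patch + patches]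

-- ===== PRECONDITION & SPEC =====
def Spec_calculate_version (commits : List (String × String)) (out : List Int) : Prop := out = calculate_version_alt commits
instance (commits : List (String × String)) (out : List Int) : Decidable (Spec_calculate_version commits out) := by unfold Spec_calculate_version; infer_instance

-- ===== CLAIM (what is proved, stated in full; the proofs are below) =====
def Claim_equal_calculate_version : Prop := ∀ (commits : List (String × String)), Dom_calculate_version commits → Spec_calculate_version commits (calculate_version commits)

-- ===== LEMMAS AND PROOFS =====

-- finalize B's state against arbitrary base components
def pvFin (a b c : Int) (st : Int × Int × Int × Bool × Bool) : List Int :=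
  let (mj, mi, pt, sM, sm) := st
  [a + mj, if sM then mi else b + mi, if sM || sm then pt else c + pt]

theorem pvMain (ks : List String) : ∀ (a b c : Int),
    ks.foldl pvStepA [a, b, c]
      = pvFin a b c (ks.foldr (fun m st => pvStepB st m) (0, 0, 0, false, false)) := by
  induction ks with
  | nil => intro a b c; simp [pvFin]
  | cons k ks ih =>
    intro a b c
    rcases hst : ks.foldr (fun m st => pvStepB st m) (0, 0, 0, false, false) with ⟨mj, mi, pt, sM, sm⟩
    rw [List.foldr_cons, List.foldl_cons, hst]
    by_cases h1 : pvKey k = "major;"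
    · rw [show pvStepA [a, b, c] k = [a + 1, 0, 0] from by simp [pvStepA, h1, pysem], ih, hst]
      simp [pvStepB, h1, pvFin]
      ring
    · by_cases h2 : pvKey k = "minor;"
      · rw [show pvStepA [a, b, c] k = [a, b + 1, 0] from by simp [pvStepA, h2, pysem], ih, hst]
        cases sM <;> simp [pvStepB, h2, pvFin] <;> ring
      · rw [show pvStepA [a, b, c] k = [a, b, c + 1] from by
            simp [pvStepA, h1, h2, PySem.List.pySetD, PySem.List.pySet?, PySem.List.pyGetD,
                  PySem.List.pyIdx?], ih, hst]
        cases sM <;> cases sm <;> simp [pvStepB, h1, h2, pvFin] <;> ring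

-- ===== VERDICT (by name: the statement is the Claim_ definition above) =====
theorem calculate_version_spec : Claim_equal_calculate_version := by
  intro commits _
  unfold Spec_calculate_version calculate_version calculate_version_alt
  rw [show (((PySem.Str.split? VERSION ".").getD []).map (fun s => (PySem.Int.ofStr? s).getD 0))
        = [(2 : Int), 0, 0] from by decide]
  rw [List.foldl_reverse, pvMain]
  rcases (PySem.Dict.ofList commits).values.foldr (fun m st => pvStepB st m) (0, 0, 0, false, false)
    with ⟨mj, mi, pt, sM, sm⟩
  simp [pvFin]
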